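-- pv_equiv track=rewrite | github.com/NotAtitYet/Recognizance-23 | Workshop_1/Assignment1.py | hash_supremacy
-- ===== SOURCE A (Python) =====
-- def hash_supremacy(string):
--     """
--     This function replaces each special symbol with '#' in the input string.
--     args:
--         string (str)
--     returns:
--         string (str)
--     ex:
--         string: "&He was a^%$ great @guy"
--         ## then
--         string: "#He was a### great #guy"
--     """
--
--     # Code Here
--     s=""
--     for i in string:
--         if (ord(i)>64 and ord(i)<91) or (ord(i)>96 and ord(i)<123) or (ord(i)>47 and ord(i)<58) or i==' ':
--             s=s+i
--         else:
--             s=s+'#'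
--     return s
-- ===== SOURCE B (Python) =====
-- import re
--
-- def hash_supremacy(string):
--     return re.sub(r'[^A-Za-z0-9 ]', '#', string)
-- ===== Notes on version B (the rewrite author's own statement) =====
-- stated objective: idiomatic
-- what changed: Replaces the manual character-by-character loop with quadratic string concatenation by a single re.sub over the exact ASCII character class.
import Mathlib
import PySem

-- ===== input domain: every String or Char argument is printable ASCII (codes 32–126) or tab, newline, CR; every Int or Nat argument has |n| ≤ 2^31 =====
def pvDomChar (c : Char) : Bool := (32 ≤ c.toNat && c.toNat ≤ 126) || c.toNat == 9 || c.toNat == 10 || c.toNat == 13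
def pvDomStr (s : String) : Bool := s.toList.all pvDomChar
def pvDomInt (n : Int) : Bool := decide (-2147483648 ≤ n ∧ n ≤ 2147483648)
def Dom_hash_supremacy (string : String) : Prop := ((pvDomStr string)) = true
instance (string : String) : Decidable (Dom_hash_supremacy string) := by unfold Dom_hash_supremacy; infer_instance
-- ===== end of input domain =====

-- B replaces A's manual scan-and-append loop with a single regex substitution over the exact ASCII class (return value only; no side effects involved).


-- ===== PORT A =====
-- Literal transliteration of A's loop: build the output by appending to an accumulator.
def hash_supremacy (string : String) : String :=
  String.mk (string.toList.foldl (fun s i =>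
    if (64 < i.toNat ∧ i.toNat < 91) ∨ (96 < i.toNat ∧ i.toNat < 123) ∨
       (47 < i.toNat ∧ i.toNat < 58) ∨ i = ' '
    then s ++ [i] else s ++ ['#']) [])

-- ===== PORT B =====
-- B is re.sub(r'[^A-Za-z0-9 ]', '#', string): one substitution pass; the character
-- class membership test is exact for the regex class [A-Za-z0-9 ].
def pvInClass (c : Char) : Bool :=
  ('A' ≤ c && c ≤ 'Z') || ('a' ≤ c && c ≤ 'z') || ('0' ≤ c && c ≤ '9') || c == ' '

def hash_supremacy_alt (string : String) : String :=
  String.mk (string.toList.map (fun c => if pvInClass c then c else '#'))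

-- ===== PRECONDITION & SPEC =====
def Spec_hash_supremacy (string : String) (out : String) : Prop := out = hash_supremacy_alt string
instance (string : String) (out : String) : Decidable (Spec_hash_supremacy string out) := by unfold Spec_hash_supremacy; infer_instance

-- ===== CLAIM (what is proved, stated in full; the proofs are below) =====
def Claim_equal_hash_supremacy : Prop := ∀ (string : String), Dom_hash_supremacy string → Spec_hash_supremacy string (hash_supremacy string)

-- ===== LEMMAS AND PROOFS =====
theorem pvCond_iff (i : Char) :
    ((64 < i.toNat ∧ i.toNat < 91) ∨ (96 < i.toNat ∧ i.toNat < 123) ∨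
     (47 < i.toNat ∧ i.toNat < 58) ∨ i = ' ') ↔ pvInClass i = true := by
  simp only [pvInClass, Bool.or_eq_true, Bool.and_eq_true, decide_eq_true_eq,
    Char.le_def, UInt32.le_iff_toNat_le, beq_iff_eq, Char.ext_iff, UInt32.ext_iff,
    Char.toNat]
  have h1 : ('A').val.toNat = 65 := rfl
  have h2 : ('Z').val.toNat = 90 := rfl
  have h3 : ('a').val.toNat = 97 := rfl
  have h4 : ('z').val.toNat = 122 := rfl
  have h5 : ('0').val.toNat = 48 := rfl
  have h6 : ('9').val.toNat = 57 := rfl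
  have h7 : (' ').val.toNat = 32 := rfl
  omega

theorem pvFold_eq (l : List Char) (acc : List Char) :
    l.foldl (fun s i =>
      if (64 < i.toNat ∧ i.toNat < 91) ∨ (96 < i.toNat ∧ i.toNat < 123) ∨
         (47 < i.toNat ∧ i.toNat < 58) ∨ i = ' '
      then s ++ [i] else s ++ ['#']) acc
    = acc ++ l.map (fun c => if pvInClass c then c else '#') := by
  induction l generalizing acc with
  | nil => simp
  | cons c t ih =>
    simp only [List.foldl_cons, List.map_cons, ih]
    rw [if_congr (pvCond_iff c) rfl rfl]
    by_cases hc : pvInClass c = true <;> simp [hc]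

-- ===== VERDICT (by name: the statement is the Claim_ definition above) =====
theorem hash_supremacy_spec : Claim_equal_hash_supremacy := by
  intro string _
  unfold Spec_hash_supremacy hash_supremacy hash_supremacy_alt
  rw [pvFold_eq]
  simp
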